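-- pv_equiv track=rewrite | github.com/MatthewLee23/reducto | validator.py | _is_derivative_section
-- ===== SOURCE A (Python) =====
-- from typing import Any, Dict, List, Optional, Tuple
--
-- DERIVATIVE_KEYWORDS = {
--     "option", "options", "put", "puts", "call", "calls", "swap", "swaps",
--     "forward", "forwards", "future", "futures", "short", "written",
--     "collateralized", "covered", "liability", "liabilities",
-- }
--
-- def _is_derivative_section(section_path: Tuple[str, ...], investment: Optional[str]) -> bool:
--     """
--     Check if this row is likely a derivative/option based on section path or investment name.
--     """
--     # Check section path
--     path_text = " ".join(section_path).lower() if section_path else ""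
--     for keyword in DERIVATIVE_KEYWORDS:
--         if keyword in path_text:
--             return True
--
--     # Check investment name
--     if investment:
--         investment_lower = investment.lower()
--         for keyword in DERIVATIVE_KEYWORDS:
--             if keyword in investment_lower:
--                 return True
--
--     return False
-- ===== SOURCE B (Python) =====
-- # One combined lowered text; a single left-to-right scan where each position does a
-- # first-letter dict lookup (a one-level trie) and only tests the few matching tails.
-- _TAILS = {
--     "o": ("ption",),
--     "p": ("ut",),
--     "c": ("all", "overed", "ollateralized"),
--     "s": ("wap", "hort"),
--     "f": ("orward", "uture"),
--     "w": ("ritten",),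
--     "l": ("iability", "iabilities"),
-- }
--
-- def _is_derivative_section(section_path, investment):
--     text = (" ".join(section_path) + "\n" + (investment or "")).lower()
--     for i, ch in enumerate(text):
--         for tail in _TAILS.get(ch, ()):
--             if text.startswith(tail, i + 1):
--                 return True
--     return False
-- ===== Notes on version B (the rewrite author's own statement) =====
-- stated objective: alternative
-- what changed: Instead of ~18 independent substring scans over each of two texts, B makes one left-to-right scan of a single newline-joined lowered text, dispatching at each position through a dict keyed by first letter (a one-level trie of a minimal plural-free keyword set) so only the few tails sharing that letter are tested.
import Mathlib
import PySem

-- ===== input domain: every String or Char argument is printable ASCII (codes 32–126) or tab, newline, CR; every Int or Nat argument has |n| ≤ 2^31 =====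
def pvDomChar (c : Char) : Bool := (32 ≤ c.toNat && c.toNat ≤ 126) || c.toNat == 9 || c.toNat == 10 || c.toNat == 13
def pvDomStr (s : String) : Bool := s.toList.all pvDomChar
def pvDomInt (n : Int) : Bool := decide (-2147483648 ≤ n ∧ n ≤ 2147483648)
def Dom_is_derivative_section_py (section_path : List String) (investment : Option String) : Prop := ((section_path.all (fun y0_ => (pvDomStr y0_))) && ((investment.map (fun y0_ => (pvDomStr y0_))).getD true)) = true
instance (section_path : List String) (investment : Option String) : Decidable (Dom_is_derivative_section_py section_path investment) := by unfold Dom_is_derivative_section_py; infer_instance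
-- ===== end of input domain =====

-- B replaces A's ~18 per-keyword substring scans over two texts by one left-to-right scan of a
-- single newline-joined lowered text with a first-letter dispatch table (objective: alternative).


-- ===== PORT A =====
-- Python iterates over a set literal; the result (an existence check) does not depend on the
-- iteration order, so the keywords are listed in the literal's order.
def derivKeywords : List String :=
  ["option", "options", "put", "puts", "call", "calls", "swap", "swaps",
   "forward", "forwards", "future", "futures", "short", "written",
   "collateralized", "covered", "liability", "liabilities"]

-- 'for keyword in …: if keyword in text: return True'
def derivLoop (text : String) : List String → Bool
  | [] => false
  | k :: rest => if PySem.Str.isIn k text then true else derivLoop text rest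

def is_derivative_section_py (section_path : List String) (investment : Option String) : Bool :=
  let path_text : String :=
    if section_path = [] then "" else PySem.Str.lower (PySem.Str.join " " section_path)
  if derivLoop path_text derivKeywords then true
  else
    match investment with
    | none => false
    | some s => if s = "" then false else derivLoop (PySem.Str.lower s) derivKeywords

-- ===== PORT B =====
-- the _TAILS dict: first letter ↦ the remaining tails of the minimal keyword set
def derivTails (c : Char) : List String :=
  if c = 'o' then ["ption"]
  else if c = 'p' then ["ut"]
  else if c = 'c' then ["all", "overed", "ollateralized"]
  else if c = 's' then ["wap", "hort"]
  else if c = 'f' then ["orward", "uture"]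
  else if c = 'w' then ["ritten"]
  else if c = 'l' then ["iability", "iabilities"]
  else []

-- 'investment or ""' as a character list
def invList : Option String → List Char
  | none => []
  | some s => s.toList

-- the scan: at each position, look the character up in the dispatch table and test its tails
def derivScanB : List Char → Bool
  | [] => false
  | c :: rest =>
    if (derivTails c).any (fun t => PySem.Chars.startswith rest t.toList) then true
    else derivScanB rest

def is_derivative_section_py_alt (section_path : List String) (investment : Option String) : Bool :=
  derivScanB (PySem.Chars.lower
    ((PySem.Str.join " " section_path).toList ++ '\n' :: invList investment))

-- ===== PRECONDITION & SPEC =====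
def Spec_is_derivative_section_py (section_path : List String) (investment : Option String) (out : Bool) : Prop := out = is_derivative_section_py_alt section_path investment
instance (section_path : List String) (investment : Option String) (out : Bool) : Decidable (Spec_is_derivative_section_py section_path investment out) := by unfold Spec_is_derivative_section_py; infer_instance

-- ===== CLAIM (what is proved, stated in full; the proofs are below) =====
def Claim_equal_is_derivative_section_py : Prop := ∀ (section_path : List String) (investment : Option String), Dom_is_derivative_section_py section_path investment → Spec_is_derivative_section_py section_path investment (is_derivative_section_py section_path investment)

-- ===== LEMMAS AND PROOFS =====

-- the minimal (plural-free) keyword set the dispatch table encodes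
def derivMin : List String :=
  ["option", "put", "call", "swap", "forward", "future",
   "short", "written", "collateralized", "covered", "liability", "liabilities"]

theorem derivLoop_cons (t k : String) (rest : List String) :
    derivLoop t (k :: rest) = if PySem.Str.isIn k t then true else derivLoop t rest := rfl

theorem derivLoop_iff (t : String) (ks : List String) :
    derivLoop t ks = true ↔ ∃ k ∈ ks, k.toList <:+: t.toList := by
  induction ks with
  | nil => simp [derivLoop]
  | cons k rest ih =>
    rw [derivLoop_cons]
    by_cases h : PySem.Str.isIn k t = true
    · rw [if_pos h]
      refine ⟨fun _ => ⟨k, List.mem_cons_self, (PySem.Str.isIn_iff_infix k t).mp h⟩, fun _ => rfl⟩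
    · rw [if_neg h, ih]
      have h' : ¬ k.toList <:+: t.toList := fun hc => h ((PySem.Str.isIn_iff_infix k t).mpr hc)
      constructor
      · rintro ⟨k', hk', hi⟩; exact ⟨k', List.mem_cons_of_mem _ hk', hi⟩
      · rintro ⟨k', hk', hi⟩
        rcases List.mem_cons.mp hk' with rfl | hm
        · exact absurd hi h'
        · exact ⟨k', hm, hi⟩

-- every minimal keyword decomposes as head letter + a tail registered under that letter
theorem tail_mem : ∀ k ∈ derivMin,
    ∃ t ∈ derivTails (k.toList.headD ' '), k.toList = k.toList.headD ' ' :: t.toList := by decide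

-- every registered (letter, tail) pair recomposes to a minimal keyword (checked as a Bool scan)
theorem cons_tail_mem_b : (['o','p','c','s','f','w','l'].all (fun c => (derivTails c).all (fun t =>
    derivMin.any (fun k => k == String.ofList (c :: t.toList))))) = true := by rfl

theorem cons_tail_mem : ∀ c ∈ ['o','p','c','s','f','w','l'], ∀ t ∈ derivTails c,
    ∃ k ∈ derivMin, k.toList = c :: t.toList := by
  intro c hc t ht
  have h1 := List.all_eq_true.mp cons_tail_mem_b c hc
  have h2 := List.all_eq_true.mp h1 t ht
  rcases List.any_eq_true.mp h2 with ⟨k, hk, hbeq⟩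
  exact ⟨k, hk, by rw [eq_of_beq hbeq]; simp⟩

theorem tails_ne_nil (c : Char) (h : derivTails c ≠ []) : c ∈ ['o','p','c','s','f','w','l'] := by
  unfold derivTails at h
  split_ifs at h with h1 h2 h3 h4 h5 h6 h7
  · subst h1; decide
  · subst h2; decide
  · subst h3; decide
  · subst h4; decide
  · subst h5; decide
  · subst h6; decide
  · subst h7; decide
  · exact absurd rfl h

-- the dispatch step finds exactly the minimal keywords starting at this position
theorem dispatch (c : Char) (rest : List Char) :
    (derivTails c).any (fun t => PySem.Chars.startswith rest t.toList) = true ↔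
      ∃ k ∈ derivMin, k.toList <+: c :: rest := by
  constructor
  · intro h
    rcases List.any_eq_true.mp h with ⟨t, ht, hs⟩
    have hc := tails_ne_nil c (List.ne_nil_of_mem ht)
    rcases cons_tail_mem c hc t ht with ⟨k, hk, hkeq⟩
    exact ⟨k, hk, hkeq ▸ List.cons_prefix_cons.mpr ⟨rfl, (PySem.Chars.startswith_iff _ _).mp hs⟩⟩
  · rintro ⟨k, hk, hpre⟩
    rcases tail_mem k hk with ⟨t, ht, heq⟩
    rw [heq] at hpre
    rcases List.cons_prefix_cons.mp hpre with ⟨hc, htail⟩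
    subst hc
    exact List.any_eq_true.mpr ⟨t, ht, (PySem.Chars.startswith_iff _ _).mpr htail⟩

theorem derivScanB_cons (c : Char) (rest : List Char) :
    derivScanB (c :: rest) =
      if (derivTails c).any (fun t => PySem.Chars.startswith rest t.toList) then true
      else derivScanB rest := rfl

theorem derivScanB_iff (cs : List Char) :
    derivScanB cs = true ↔ ∃ k ∈ derivMin, k.toList <:+: cs := by
  induction cs with
  | nil => exact ⟨fun h => absurd h (by decide), fun h => absurd h (by decide)⟩
  | cons c rest ih =>
    rw [derivScanB_cons]
    by_cases h : (derivTails c).any (fun t => PySem.Chars.startswith rest t.toList) = true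
    · rw [if_pos h]
      refine ⟨fun _ => ?_, fun _ => rfl⟩
      rcases (dispatch c rest).mp h with ⟨k, hk, hp⟩
      exact ⟨k, hk, hp.isInfix⟩
    · rw [if_neg h, ih]
      constructor
      · rintro ⟨k, hk, hi⟩; exact ⟨k, hk, List.infix_cons hi⟩
      · rintro ⟨k, hk, hi⟩
        rcases List.infix_cons_iff.mp hi with hp | hi'
        · exact absurd ((dispatch c rest).mpr ⟨k, hk, hp⟩) h
        · exact ⟨k, hk, hi'⟩

theorem prefix_mid (k u v : List Char) (hk : '\n' ∉ k) (h : k <+: u ++ '\n' :: v) : k <+: u := by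
  by_cases hl : k.length ≤ u.length
  · exact List.prefix_of_prefix_length_le h (List.prefix_append u ('\n' :: v)) hl
  · exfalso
    have hlt : u.length < k.length := Nat.lt_of_not_le hl
    have hbig : u.length < (u ++ '\n' :: v).length := by
      simp [List.length_append]
    have hget : k[u.length]'hlt = (u ++ '\n' :: v)[u.length]'hbig := h.getElem hlt
    have : (u ++ '\n' :: v)[u.length]'hbig = '\n' := by
      rw [List.getElem_append_right (le_refl u.length)]
      simp
    exact hk (this ▸ hget ▸ List.getElem_mem hlt)

theorem split_infix (k : List Char) (hk : '\n' ∉ k) (hne : k ≠ []) (a b : List Char) :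
    k <:+: a ++ '\n' :: b ↔ (k <:+: a ∨ k <:+: b) := by
  induction a with
  | nil =>
    simp only [List.nil_append, List.infix_cons_iff]
    constructor
    · rintro (hp | hi)
      · exact absurd (List.prefix_nil.mp (prefix_mid k [] b hk hp)) hne
      · exact Or.inr hi
    · rintro (h | h)
      · exact absurd (List.eq_nil_of_infix_nil h) hne
      · exact Or.inr h
  | cons x a' ih =>
    have : (x :: a') ++ '\n' :: b = x :: (a' ++ '\n' :: b) := rfl
    rw [this, List.infix_cons_iff, ih, List.infix_cons_iff]
    constructor
    · rintro (hp | hp | hi)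
      · exact Or.inl (Or.inl (prefix_mid k (x :: a') b hk hp))
      · exact Or.inl (Or.inr hp)
      · exact Or.inr hi
    · rintro ((hp | hi) | hb)
      · exact Or.inl (hp.trans (List.prefix_append (x :: a') ('\n' :: b)))
      · exact Or.inr (Or.inl hi)
      · exact Or.inr (Or.inr hb)

theorem derivMin_sub : ∀ k ∈ derivMin, k ∈ derivKeywords := by decide

theorem reduceK (t : List Char) :
    (∃ k ∈ derivKeywords, k.toList <:+: t) ↔ (∃ k ∈ derivMin, k.toList <:+: t) := by
  constructor
  · rintro ⟨k, hk, hinf⟩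
    simp only [derivKeywords, List.mem_cons, List.not_mem_nil, or_false] at hk
    rcases hk with rfl|rfl|rfl|rfl|rfl|rfl|rfl|rfl|rfl|rfl|rfl|rfl|rfl|rfl|rfl|rfl|rfl|rfl
    · exact ⟨"option", by decide, hinf⟩
    · exact ⟨"option", by decide, List.IsInfix.trans (by decide) hinf⟩
    · exact ⟨"put", by decide, hinf⟩
    · exact ⟨"put", by decide, List.IsInfix.trans (by decide) hinf⟩
    · exact ⟨"call", by decide, hinf⟩
    · exact ⟨"call", by decide, List.IsInfix.trans (by decide) hinf⟩
    · exact ⟨"swap", by decide, hinf⟩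
    · exact ⟨"swap", by decide, List.IsInfix.trans (by decide) hinf⟩
    · exact ⟨"forward", by decide, hinf⟩
    · exact ⟨"forward", by decide, List.IsInfix.trans (by decide) hinf⟩
    · exact ⟨"future", by decide, hinf⟩
    · exact ⟨"future", by decide, List.IsInfix.trans (by decide) hinf⟩
    · exact ⟨"short", by decide, hinf⟩
    · exact ⟨"written", by decide, hinf⟩
    · exact ⟨"collateralized", by decide, hinf⟩
    · exact ⟨"covered", by decide, hinf⟩
    · exact ⟨"liability", by decide, hinf⟩
    · exact ⟨"liabilities", by decide, hinf⟩
  · rintro ⟨k, hk, hinf⟩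
    exact ⟨k, derivMin_sub k hk, hinf⟩


theorem no_keyword_in_nil : ¬ ∃ k ∈ derivKeywords, k.toList <:+: ([] : List Char) := by decide

-- the investment-side text both characterisations speak about
def invLow (investment : Option String) : List Char := PySem.Chars.lower (invList investment)

-- all 18 keywords are newline-free and nonempty
theorem derivKeys_no_nl : ∀ k ∈ derivKeywords, '\n' ∉ k.toList ∧ k.toList ≠ [] := by decide

-- characterisation of B
theorem alt_iff (section_path : List String) (investment : Option String) :
    is_derivative_section_py_alt section_path investment = true ↔
      ((∃ k ∈ derivKeywords, k.toList <:+: PySem.Chars.lower (PySem.Str.join " " section_path).toList) ∨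
       (∃ k ∈ derivKeywords, k.toList <:+: invLow investment)) := by
  unfold is_derivative_section_py_alt
  have hsplit : PySem.Chars.lower ((PySem.Str.join " " section_path).toList ++ '\n' :: invList investment)
      = PySem.Chars.lower (PySem.Str.join " " section_path).toList ++ '\n' ::
        PySem.Chars.lower (invList investment) := by
    simp [PySem.Chars.lower]
    decide
  rw [hsplit, derivScanB_iff, ← reduceK]
  unfold invLow
  constructor
  · rintro ⟨k, hk, hinf⟩
    rcases (split_infix k.toList (derivKeys_no_nl k hk).1 (derivKeys_no_nl k hk).2 _ _).mp hinf with h | h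
    · exact Or.inl ⟨k, hk, h⟩
    · exact Or.inr ⟨k, hk, h⟩
  · rintro (⟨k, hk, h⟩ | ⟨k, hk, h⟩)
    · exact ⟨k, hk, (split_infix k.toList (derivKeys_no_nl k hk).1 (derivKeys_no_nl k hk).2 _ _).mpr (Or.inl h)⟩
    · exact ⟨k, hk, (split_infix k.toList (derivKeys_no_nl k hk).1 (derivKeys_no_nl k hk).2 _ _).mpr (Or.inr h)⟩

-- characterisation of A
theorem a_iff (section_path : List String) (investment : Option String) :
    is_derivative_section_py section_path investment = true ↔
      ((∃ k ∈ derivKeywords, k.toList <:+: PySem.Chars.lower (PySem.Str.join " " section_path).toList) ∨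
       (∃ k ∈ derivKeywords, k.toList <:+: invLow investment)) := by
  unfold is_derivative_section_py invLow invList
  have hpath : (if section_path = [] then "" else PySem.Str.lower (PySem.Str.join " " section_path)).toList
      = PySem.Chars.lower (PySem.Str.join " " section_path).toList := by
    by_cases h : section_path = []
    · subst h; decide
    · rw [if_neg h]; simp
  by_cases hl : derivLoop (if section_path = [] then "" else PySem.Str.lower (PySem.Str.join " " section_path)) derivKeywords = true
  · have hex := (derivLoop_iff _ derivKeywords).mp hl
    rw [hpath] at hex
    rw [if_pos hl]
    exact ⟨fun _ => Or.inl hex, fun _ => rfl⟩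
  · have hnp : ¬ ∃ k ∈ derivKeywords, k.toList <:+: PySem.Chars.lower (PySem.Str.join " " section_path).toList := by
      intro hc
      exact hl ((derivLoop_iff _ derivKeywords).mpr (by rw [hpath]; exact hc))
    simp only [Bool.not_eq_true] at hl
    rw [if_neg (by simp [hl])]
    match investment with
    | none =>
      constructor
      · intro h; exact absurd h (by decide)
      · rintro (h | h)
        · exact absurd h hnp
        · exact absurd h no_keyword_in_nil
    | some s =>
      by_cases hs : s = ""
      · subst hs
        constructor
        · intro h; exact absurd h (by decide)
        · rintro (h | h)
          · exact absurd h hnp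
          · exact absurd h (by decide)
      · simp only [if_neg hs]
        rw [derivLoop_iff]
        have : (PySem.Str.lower s).toList = PySem.Chars.lower s.toList := by simp
        rw [this]
        constructor
        · exact Or.inr
        · rintro (h | h)
          · exact absurd h hnp
          · exact h

-- ===== VERDICT (by name: the statement is the Claim_ definition above) =====
theorem is_derivative_section_py_spec : Claim_equal_is_derivative_section_py := by
  intro section_path investment _
  unfold Spec_is_derivative_section_py
  have ha := a_iff section_path investment
  have hb := alt_iff section_path investment
  by_cases h : is_derivative_section_py section_path investment = true
  · rw [h, Eq.symm (hb.mpr (ha.mp h))]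
  · have : is_derivative_section_py_alt section_path investment ≠ true := fun hc => h (ha.mpr (hb.mp hc))
    simp only [Bool.not_eq_true] at h this
    rw [h, this]
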